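-- pv_equiv track=rewrite | github.com/poliakev/Assign4-496-JCJ | Go4/pattern.py | pat3_expand
-- ===== SOURCE A (Python) =====
-- from functools import reduce
--
-- def pat3_expand(pat):
--     """ All possible neighborhood configurations matching a given pattern;
--         used just for a combinatoric explosion when loading them in an
--         in-memory set. """
--     def pat_rot90(p):
--         return [p[2][0] + p[1][0] + p[0][0], p[2][1] + p[1][1] + p[0][1], p[2][2] + p[1][2] + p[0][2]]
--     def pat_vertflip(p):
--         return [p[2], p[1], p[0]]
--     def pat_horizflip(p):
--         return [l[::-1] for l in p]
--     def pat_swapcolors(p):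
--         return [l.replace('X', 'Z').replace('x', 'z').replace('O', 'X').replace('o', 'x').replace('Z', 'O').replace('z', 'o') for l in p]
--     def pat_wildexp(p, c, to):
--         i = p.find(c)
--         if i == -1:
--             return [p]
--         return reduce(lambda a, b: a + b, [pat_wildexp(p[:i] + t + p[i+1:], c, to) for t in to])
--     def pat_wildcards(pat):
--         return [p for p in pat_wildexp(pat, '?', list('.XO '))
--                 for p in pat_wildexp(p, 'x', list('.O '))
--                 for p in pat_wildexp(p, 'o', list('.X '))]
--     return [p for p in [pat, pat_rot90(pat)]
--             for p in [p, pat_vertflip(p)]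
--             for p in [p, pat_horizflip(p)]
--             for p in [p, pat_swapcolors(p)]
--             for p in pat_wildcards(''.join(p))]
-- ===== SOURCE B (Python) =====
-- from itertools import product
--
-- # Wildcard options, in the order the expansion applies them.
-- _OPTS = (('?', '.XO '), ('x', '.O '), ('o', '.X '))
--
-- def pat3_expand(pat):
--     """ All possible neighborhood configurations matching a given pattern;
--         used just for a combinatoric explosion when loading them in an
--         in-memory set. """
--     def rot90(p):
--         return [p[2][0] + p[1][0] + p[0][0], p[2][1] + p[1][1] + p[0][1], p[2][2] + p[1][2] + p[0][2]]
--     def vertflip(p):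
--         return [p[2], p[1], p[0]]
--     def horizflip(p):
--         return [l[::-1] for l in p]
--     def swapcolors(p):
--         return [l.replace('X', 'Z').replace('x', 'z').replace('O', 'X').replace('o', 'x').replace('Z', 'O').replace('z', 'o') for l in p]
--     def wildcards(s):
--         # All (position, options) slots: every '?' left-to-right, then every 'x', then every 'o'.
--         slots = [(i, to) for c, to in _OPTS for i in range(len(s)) if s[i] == c]
--         out = []
--         for combo in product(*(to for _, to in slots)):
--             chars = list(s)
--             for (i, _), t in zip(slots, combo):
--                 chars[i] = t
--             out.append(''.join(chars))
--         return out
--     syms = [pat, rot90(pat)]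
--     for f in (vertflip, horizflip, swapcolors):
--         syms = [q for p in syms for q in (p, f(p))]
--     return [s for p in syms for s in wildcards(''.join(p))]
-- ===== Notes on version B (the rewrite author's own statement) =====
-- stated objective: alternative
-- what changed: The recursive pat_wildexp (find first wildcard, slice the string, recurse per option, concatenate the result lists with reduce) and the three nested comprehensions over it are replaced by a single scan that collects all wildcard slots ('?' then 'x' then 'o' positions) and one itertools.product pass substituting each combination into a char buffer; the 4-level nested symmetry comprehension becomes a fold over the three flip/swap transforms.
import Mathlib
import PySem

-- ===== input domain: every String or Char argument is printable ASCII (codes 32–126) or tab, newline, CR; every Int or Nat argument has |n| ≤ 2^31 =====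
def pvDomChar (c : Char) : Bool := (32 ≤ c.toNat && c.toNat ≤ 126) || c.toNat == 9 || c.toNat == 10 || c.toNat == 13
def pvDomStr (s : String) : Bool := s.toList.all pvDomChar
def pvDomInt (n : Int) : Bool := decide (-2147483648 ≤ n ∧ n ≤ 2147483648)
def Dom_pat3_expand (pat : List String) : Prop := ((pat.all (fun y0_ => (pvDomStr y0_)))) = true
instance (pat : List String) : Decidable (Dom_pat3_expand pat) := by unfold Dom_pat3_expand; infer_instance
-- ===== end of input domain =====

-- B replaces the recursive find/slice/reduce wildcard expansion by a single scan that collects the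
-- wildcard slots and one itertools.product-style pass substituting each combination (objective: alternative).

-- ===== PORT A =====

-- functools.reduce(lambda a, b: a + b, l); raises on [] — every call site passes a nonempty list
def pvReduceAddA (l : List (List String)) : List String :=
  match l with
  | [] => []
  | h :: t => t.foldl (fun a b => a ++ b) h

-- p[i][j], total form; Pre_pat3_expand keeps every use in range
def pvIdxA (p : List String) (i j : Int) : Char :=
  (PySem.Str.pyGet? (PySem.List.pyGetD p i "") j).getD ' '

def pvRot90A (p : List String) : List String :=
  [String.ofList [pvIdxA p 2 0, pvIdxA p 1 0, pvIdxA p 0 0],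
   String.ofList [pvIdxA p 2 1, pvIdxA p 1 1, pvIdxA p 0 1],
   String.ofList [pvIdxA p 2 2, pvIdxA p 1 2, pvIdxA p 0 2]]

def pvVertflipA (p : List String) : List String :=
  [PySem.List.pyGetD p 2 "", PySem.List.pyGetD p 1 "", PySem.List.pyGetD p 0 ""]

def pvHorizflipA (p : List String) : List String :=
  p.map (fun l => (PySem.Str.slice? l none none (-1)).getD "")

def pvSwapcolorsA (p : List String) : List String :=
  p.map (fun l =>
    PySem.Str.replace (PySem.Str.replace (PySem.Str.replace (PySem.Str.replace
      (PySem.Str.replace (PySem.Str.replace l "X" "Z") "x" "z") "O" "X") "o" "x") "Z" "O") "z" "o")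

-- pat_wildexp; fuel bounds the recursion depth (each step removes one occurrence of c, so
-- len(p)+1 is always enough and the fuel guard is never hit)
def pvWildexpA (fuel : Nat) (p : String) (c : String) (tos : List String) : List String :=
  match fuel with
  | 0 => [p]
  | f + 1 =>
    let i := PySem.Str.find p c
    if i = -1 then [p]
    else pvReduceAddA (tos.map (fun t =>
      pvWildexpA f (PySem.Str.join "" [PySem.Str.slice p none (some i), t,
        PySem.Str.slice p (some (i + 1)) none]) c tos))

def pvWildcardsA (s : String) : List String :=
  (pvWildexpA (s.toList.length + 1) s "?" [".", "X", "O", " "]).flatMap (fun p =>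
    (pvWildexpA (p.toList.length + 1) p "x" [".", "O", " "]).flatMap (fun p =>
      pvWildexpA (p.toList.length + 1) p "o" [".", "X", " "]))

def pat3_expand (pat : List String) : List String :=
  [pat, pvRot90A pat].flatMap (fun p =>
    [p, pvVertflipA p].flatMap (fun p =>
      [p, pvHorizflipA p].flatMap (fun p =>
        [p, pvSwapcolorsA p].flatMap (fun p =>
          pvWildcardsA (PySem.Str.join "" p)))))

-- ===== PORT B =====

def pvIdxB (p : List String) (i j : Int) : Char :=
  (PySem.Str.pyGet? (PySem.List.pyGetD p i "") j).getD ' '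

def pvRot90B (p : List String) : List String :=
  [String.ofList [pvIdxB p 2 0, pvIdxB p 1 0, pvIdxB p 0 0],
   String.ofList [pvIdxB p 2 1, pvIdxB p 1 1, pvIdxB p 0 1],
   String.ofList [pvIdxB p 2 2, pvIdxB p 1 2, pvIdxB p 0 2]]

def pvVertflipB (p : List String) : List String :=
  [PySem.List.pyGetD p 2 "", PySem.List.pyGetD p 1 "", PySem.List.pyGetD p 0 ""]

def pvHorizflipB (p : List String) : List String :=
  p.map (fun l => (PySem.Str.slice? l none none (-1)).getD "")

def pvSwapcolorsB (p : List String) : List String :=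
  p.map (fun l =>
    PySem.Str.replace (PySem.Str.replace (PySem.Str.replace (PySem.Str.replace
      (PySem.Str.replace (PySem.Str.replace l "X" "Z") "x" "z") "O" "X") "o" "x") "Z" "O") "z" "o")

-- _OPTS
def pvOptsB : List (Char × List Char) :=
  [('?', ['.', 'X', 'O', ' ']), ('x', ['.', 'O', ' ']), ('o', ['.', 'X', ' '])]

-- itertools.product(*lists): rightmost factor varies fastest
def pvProdB (ls : List (List Char)) : List (List Char) :=
  ls.foldr (fun tos acc => tos.flatMap (fun t => acc.map (fun rest => t :: rest))) [[]]

-- slots = [(i, to) for c, to in _OPTS for i in range(len(s)) if s[i] == c]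
def pvSlotsB (cs : List Char) : List (Nat × List Char) :=
  pvOptsB.flatMap (fun q =>
    ((List.range cs.length).filter (fun i => cs.getD i ' ' == q.1)).map (fun i => (i, q.2)))

def pvWildcardsB (s : String) : List String :=
  let cs := s.toList
  let slots := pvSlotsB cs
  (pvProdB (slots.map Prod.snd)).map (fun combo =>
    String.ofList ((slots.zip combo).foldl (fun chars q => chars.set q.1.1 q.2) cs))

def pat3_expand_alt (pat : List String) : List String :=
  (([pvVertflipB, pvHorizflipB, pvSwapcolorsB].foldl
      (fun syms f => syms.flatMap (fun p => [p, f p])) [pat, pvRot90B pat])).flatMap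
    (fun p => pvWildcardsB (PySem.Str.join "" p))

-- ===== PRECONDITION & SPEC =====
-- Pre_ excludes exactly the inputs where Python raises IndexError: fewer than 3 rows, or one of
-- the first three rows shorter than 3 characters (pat_rot90/pat_vertflip index rows 0..2, cols 0..2).
def Pre_pat3_expand (pat : List String) : Prop :=
  3 ≤ pat.length ∧ 3 ≤ (pat.getD 0 "").toList.length ∧
    3 ≤ (pat.getD 1 "").toList.length ∧ 3 ≤ (pat.getD 2 "").toList.length
instance (pat : List String) : Decidable (Pre_pat3_expand pat) := by
  unfold Pre_pat3_expand; infer_instance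

def pvWitness_pat3_expand : List String := ["X..", ".O.", "..X"]

def Spec_pat3_expand (pat : List String) (out : List String) : Prop := out = pat3_expand_alt pat
instance (pat : List String) (out : List String) : Decidable (Spec_pat3_expand pat out) := by
  unfold Spec_pat3_expand; infer_instance

-- ===== CLAIM (what is proved, stated in full; the proofs are below) =====
def Claim_equal_pat3_expand : Prop :=
  ∀ (pat : List String), Dom_pat3_expand pat → Pre_pat3_expand pat →
    Spec_pat3_expand pat (pat3_expand pat)

-- ===== LEMMAS AND PROOFS =====

-- one wildcard class, expanded by structural recursion: the common reference shape
def Wrec (c : Char) (tos : List Char) : List Char → List (List Char)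
  | [] => [[]]
  | h :: tl =>
    if h = c then tos.flatMap (fun t => (Wrec c tos tl).map (fun a => t :: a))
    else (Wrec c tos tl).map (fun a => h :: a)

-- all three classes, '?' outermost
def W3 (cs : List Char) : List (List Char) :=
  (Wrec '?' ['.', 'X', 'O', ' '] cs).flatMap (fun a =>
    (Wrec 'x' ['.', 'O', ' '] a).flatMap (fun b => Wrec 'o' ['.', 'X', ' '] b))

lemma reduceAddA_map {α : Type} (g : α → List String) (l : List α) (h : l ≠ []) :
    pvReduceAddA (l.map g) = l.flatMap g := by
  cases l with
  | nil => exact absurd rfl h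
  | cons x t =>
    simp only [List.map_cons, pvReduceAddA, List.flatMap_cons]
    rw [show (fun (a b : List String) => a ++ b) = (fun (acc : List String) (x : List String) => acc ++ id x) from rfl,
      PySem.List.foldl_append_eq_flatMap]
    simp [List.flatMap_map]

lemma Wrec_append (c : Char) (tos : List Char) (xs ys : List Char) :
    Wrec c tos (xs ++ ys) = (Wrec c tos xs).flatMap (fun a => (Wrec c tos ys).map (fun b => a ++ b)) := by
  induction xs with
  | nil => simp [Wrec]
  | cons h tl ih =>
    by_cases hc : h = c <;>
      simp [Wrec, hc, ih, List.map_flatMap, List.flatMap_map, List.map_map,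
        List.flatMap_assoc, Function.comp_def]

lemma Wrec_no_c (c : Char) (tos : List Char) (xs : List Char) (h : c ∉ xs) :
    Wrec c tos xs = [xs] := by
  induction xs with
  | nil => rfl
  | cons h tl ih =>
    simp only [List.mem_cons, not_or] at h
    rw [Wrec, if_neg (fun hh => h.1 hh.symm), ih h.2]
    rfl

lemma Wrec_length (c : Char) (tos : List Char) :
    ∀ (cs a : List Char), a ∈ Wrec c tos cs → a.length = cs.length := by
  intro cs
  induction cs with
  | nil => intro a ha; simp [Wrec] at ha; simp [ha]
  | cons h tl ih =>
    intro a ha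
    by_cases hc : h = c <;> simp [Wrec, hc] at ha
    · obtain ⟨t, ht, b, hb, rfl⟩ := ha
      simp [ih b hb]
    · obtain ⟨b, hb, rfl⟩ := ha
      simp [ih b hb]

lemma Wrec_getD (c c' : Char) (tos : List Char) (hcc : c' ≠ c) (hto : ∀ t ∈ tos, t ≠ c') :
    ∀ (cs a : List Char), a ∈ Wrec c tos cs → ∀ (i : Nat) (d : Char),
      (a.getD i d == c') = (cs.getD i d == c') := by
  intro cs
  induction cs with
  | nil => intro a ha; simp [Wrec] at ha; simp [ha]
  | cons h tl ih =>
    intro a ha i d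
    by_cases hc : h = c <;> simp [Wrec, hc] at ha
    · obtain ⟨t, ht, b, hb, rfl⟩ := ha
      cases i with
      | zero =>
        have h1 : (t == c') = false := by simp; exact hto t ht
        have h2 : (h == c') = false := by simp; intro hh; exact hcc (hh ▸ hc)
        simp [h1, h2]
      | succ n => simp only [List.getD_cons_succ]; exact ih b hb n d
    · obtain ⟨b, hb, rfl⟩ := ha
      cases i with
      | zero => simp
      | succ n => simp only [List.getD_cons_succ]; exact ih b hb n d

lemma wildexpA_eq (cc : Char) (toC : List Char) (tos : List String)
    (hmap : tos = toC.map (fun t => String.ofList [t])) (hto : cc ∉ toC) (hne : toC ≠ []) :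
    ∀ (fuel : Nat) (s : String), s.toList.count cc < fuel →
      pvWildexpA fuel s (String.ofList [cc]) tos = (Wrec cc toC s.toList).map String.ofList := by
  intro fuel
  induction fuel with
  | zero => intro s h; omega
  | succ f ih =>
    intro s hcount
    have hfind : PySem.Str.find s (String.ofList [cc]) = PySem.Chars.find s.toList [cc] := by
      rw [PySem.Str.find_eq, String.toList_ofList]
    by_cases hmem : cc ∈ s.toList
    · -- cc occurs: find ≥ 0, split the string at the first occurrence
      have hinf : [cc] <:+: s.toList := by
        obtain ⟨j, hj, hget⟩ := List.mem_iff_getElem.1 hmem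
        have h1 : [cc] <+: s.toList.drop j := by
          refine ⟨s.toList.drop (j + 1), ?_⟩
          rw [List.drop_eq_getElem_cons hj, hget]; rfl
        exact h1.isInfix.trans (List.drop_suffix j s.toList).isInfix
      have hnonneg : 0 ≤ PySem.Chars.find s.toList [cc] :=
        (PySem.Chars.find_nonneg_iff _ _).2 hinf
      set k : Nat := (PySem.Chars.find s.toList [cc]).toNat with hkdef
      have hik : PySem.Chars.find s.toList [cc] = (k : Int) :=
        (Int.toNat_of_nonneg hnonneg).symm
      obtain ⟨hpre, hmin⟩ := PySem.Chars.find_spec hnonneg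
      have hklt : k < s.toList.length := by
        by_contra hk
        rw [List.drop_eq_nil_of_le (le_of_not_gt hk)] at hpre
        exact absurd (List.prefix_nil.1 hpre) (by simp)
      have hgetk : s.toList[k] = cc := by
        rw [List.drop_eq_getElem_cons hklt] at hpre
        obtain ⟨l', hl', -⟩ := List.cons_prefix_iff.1 hpre
        simpa [List.getElem?_eq_getElem hklt] using congrArg (fun l => l.headD ' ') hl'
      have htake : cc ∉ s.toList.take k := by
        intro hmemt
        obtain ⟨j, hj, hget⟩ := List.mem_iff_getElem.1 hmemt
        have hjk : j < k := by simpa using (List.length_take_le k s.toList).trans_lt' hj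
        have hjlen : j < s.toList.length := hjk.trans hklt
        rw [List.getElem_take] at hget
        refine hmin j hjk ⟨s.toList.drop (j + 1), ?_⟩
        rw [List.drop_eq_getElem_cons hjlen, hget]; rfl
      have hdec : s.toList = s.toList.take k ++ cc :: s.toList.drop (k + 1) := by
        conv_lhs => rw [← List.take_append_drop k s.toList]
        rw [List.drop_eq_getElem_cons hklt, hgetk]
      have harg : ∀ tS : String,
          (PySem.Str.join "" [PySem.Str.slice s none (some ((k : Int))), tS,
            PySem.Str.slice s (some ((k : Int) + 1)) none]).toList
          = s.toList.take k ++ tS.toList ++ s.toList.drop (k + 1) := by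
        intro tS
        rw [PySem.Str.toList_join]
        simp only [List.map_cons, List.map_nil, PySem.Str.toList_slice,
          PySem.Chars.slice_eq_listSlice]
        rw [PySem.Chars.join_cons_cons, PySem.Chars.join_cons_cons, PySem.Chars.join_singleton]
        have h1 : (k : Int) + 1 = ((k + 1 : Nat) : Int) := by push_cast; ring
        rw [h1, PySem.List.slice_to_natCast, PySem.List.slice_from_natCast]
        simp [List.append_assoc]
      have h0 : List.count cc s.toList = List.count cc (s.toList.drop (k + 1)) + 1 := by
        conv_lhs => rw [hdec]
        simp [List.count_append, List.count_eq_zero.2 htake]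
      rw [pvWildexpA]
      simp only [hfind, hik]
      rw [if_neg (by omega)]
      rw [hmap, List.map_map, reduceAddA_map _ toC hne]
      conv_rhs => rw [hdec]
      rw [Wrec_append, Wrec_no_c cc toC _ htake]
      rw [show Wrec cc toC (cc :: s.toList.drop (k + 1))
            = toC.flatMap (fun t => (Wrec cc toC (s.toList.drop (k + 1))).map (fun a => t :: a))
          from by rw [Wrec, if_pos rfl]]
      simp only [List.flatMap_cons, List.flatMap_nil, List.append_nil, List.map_flatMap,
        List.map_map]
      refine List.flatMap_congr (fun t ht => ?_)
      have htc : t ≠ cc := fun h => hto (h ▸ ht)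
      simp only [Function.comp_apply]
      rw [← hmap]
      have hcnt : ((PySem.Str.join "" [PySem.Str.slice s none (some ((k : Int))),
          String.ofList [t],
          PySem.Str.slice s (some ((k : Int) + 1)) none]).toList).count cc < f := by
        rw [harg]
        simp [List.count_append, List.count_eq_zero.2 htake, htc]
        omega
      rw [ih _ hcnt, harg]
      have hfree : cc ∉ s.toList.take k ++ [t] := by
        simp only [List.mem_append, List.mem_singleton]
        rintro (h | h)
        · exact htake h
        · exact htc h.symm
      rw [String.toList_ofList, Wrec_append, Wrec_no_c cc toC (s.toList.take k ++ [t]) hfree]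
      simp [Function.comp_def, List.append_assoc]
    · -- cc absent: find = -1, both sides are the singleton
      have hinf : ¬ [cc] <:+: s.toList := fun hi => hmem (hi.subset (by simp))
      have hfneg : PySem.Chars.find s.toList [cc] = -1 :=
        (PySem.Chars.find_eq_neg_one_iff _ _).2 hinf
      rw [pvWildexpA]
      simp only [hfind, hfneg, if_pos]
      rw [Wrec_no_c cc toC _ hmem]
      simp [String.ofList_toList]

lemma wildcardsA_eq (s : String) : pvWildcardsA s = (W3 s.toList).map String.ofList := by
  unfold pvWildcardsA W3
  rw [show ("?" : String) = String.ofList ['?'] from rfl,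
      show ("x" : String) = String.ofList ['x'] from rfl,
      show ("o" : String) = String.ofList ['o'] from rfl]
  rw [wildexpA_eq '?' ['.', 'X', 'O', ' '] [".", "X", "O", " "] (by decide) (by decide)
        (by decide) _ s (Nat.lt_succ_of_le List.count_le_length)]
  simp only [List.map_flatMap, List.flatMap_map]
  refine List.flatMap_congr (fun a _ => ?_)
  rw [wildexpA_eq 'x' ['.', 'O', ' '] [".", "O", " "] (by decide) (by decide) (by decide)
        _ (String.ofList a) (by rw [String.toList_ofList]; exact Nat.lt_succ_of_le List.count_le_length)]
  rw [String.toList_ofList]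
  simp only [List.flatMap_map]
  refine List.flatMap_congr (fun b _ => ?_)
  rw [wildexpA_eq 'o' ['.', 'X', ' '] [".", "X", " "] (by decide) (by decide) (by decide)
        _ (String.ofList b) (by rw [String.toList_ofList]; exact Nat.lt_succ_of_le List.count_le_length)]
  rw [String.toList_ofList]

def posOf (c : Char) (cs : List Char) : List Nat :=
  (List.range cs.length).filter (fun i => cs.getD i ' ' == c)

def substAt (cs : List Char) (ps : List Nat) (combo : List Char) : List Char :=
  (ps.zip combo).foldl (fun a q => a.set q.1 q.2) cs

lemma posOf_cons (c h : Char) (tl : List Char) :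
    posOf c (h :: tl) = (if h = c then [0] else []) ++ (posOf c tl).map (· + 1) := by
  unfold posOf
  rw [List.length_cons, List.range_succ_eq_map, List.filter_cons, List.filter_map]
  have hp : ((h :: tl).getD 0 ' ' == c) = (h == c) := rfl
  by_cases hc : h = c
  · simp [hc, Function.comp_def, Nat.succ_eq_add_one]
  · have : (h == c) = false := by simp [hc]
    simp [this, hc, Function.comp_def, Nat.succ_eq_add_one]

lemma substAt_shift (h : Char) (tl : List Char) :
    ∀ (ps : List Nat) (combo : List Char),
      substAt (h :: tl) (ps.map (· + 1)) combo = h :: substAt tl ps combo := by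
  intro ps
  induction ps generalizing tl with
  | nil => intro combo; simp [substAt]
  | cons p ps ih =>
    intro combo
    cases combo with
    | nil => simp [substAt]
    | cons t combo =>
      simp only [substAt, List.map_cons, List.zip_cons_cons, List.foldl_cons,
        List.set_cons_succ] at *
      exact ih (tl.set p t) combo

lemma substAt_append (cs : List Char) (p1 p2 : List Nat) (c1 c2 : List Char)
    (hlen : p1.length = c1.length) :
    substAt cs (p1 ++ p2) (c1 ++ c2) = substAt (substAt cs p1 c1) p2 c2 := by
  unfold substAt
  rw [List.zip_append hlen, List.foldl_append]

lemma foldl_slots_eq_substAt (cs : List Char) :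
    ∀ (slots : List (Nat × List Char)) (combo : List Char),
      (slots.zip combo).foldl (fun chars q => chars.set q.1.1 q.2) cs
        = substAt cs (slots.map Prod.fst) combo := by
  intro slots
  induction slots generalizing cs with
  | nil => intro combo; simp [substAt]
  | cons q slots ih =>
    intro combo
    cases combo with
    | nil => simp [substAt]
    | cons t combo =>
      simp only [substAt, List.map_cons, List.zip_cons_cons, List.foldl_cons] at *
      exact ih (cs.set q.1 t) combo

lemma prodB_cons (tos : List Char) (ls : List (List Char)) :
    pvProdB (tos :: ls) = tos.flatMap (fun t => (pvProdB ls).map (fun rest => t :: rest)) := rfl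

lemma length_of_mem_prodB :
    ∀ (ls : List (List Char)) (combo : List Char), combo ∈ pvProdB ls → combo.length = ls.length := by
  intro ls
  induction ls with
  | nil =>
    intro combo h
    simp [pvProdB] at h
    simp [h]
  | cons tos ls ih =>
    intro combo h
    rw [prodB_cons] at h
    simp only [List.mem_flatMap, List.mem_map] at h
    obtain ⟨t, _, rest, hrest, rfl⟩ := h
    simp [ih rest hrest]

lemma prodB_append (l1 l2 : List (List Char)) :
    pvProdB (l1 ++ l2) = (pvProdB l1).flatMap (fun a => (pvProdB l2).map (fun b => a ++ b)) := by
  induction l1 with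
  | nil => simp [pvProdB]
  | cons tos l1 ih =>
    rw [List.cons_append, prodB_cons, prodB_cons, ih]
    simp [List.map_flatMap, List.flatMap_assoc, List.flatMap_map, List.map_map, Function.comp_def]

lemma posOf_cons_self (c : Char) (tl : List Char) :
    posOf c (c :: tl) = 0 :: (posOf c tl).map (· + 1) := by
  rw [posOf_cons]; simp

lemma posOf_cons_ne (c h : Char) (tl : List Char) (hc : h ≠ c) :
    posOf c (h :: tl) = (posOf c tl).map (· + 1) := by
  rw [posOf_cons]; simp [hc]

lemma classB (c : Char) (tos : List Char) :
    ∀ (cs : List Char),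
      (pvProdB ((posOf c cs).map (fun _ => tos))).map (substAt cs (posOf c cs)) = Wrec c tos cs := by
  intro cs
  induction cs with
  | nil => simp [posOf, pvProdB, substAt, Wrec]
  | cons h tl ih =>
    by_cases hc : h = c
    · subst hc
      rw [posOf_cons_self, Wrec, if_pos rfl]
      simp only [List.map_cons, prodB_cons, List.map_map, Function.comp_def,
        List.map_flatMap]
      refine List.flatMap_congr (fun t _ => ?_)
      rw [← ih, List.map_map]
      refine List.map_congr_left (fun combo _ => ?_)
      simp only [Function.comp_def, substAt, List.zip_cons_cons, List.foldl_cons,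
        List.set_cons_zero]
      exact (substAt_shift t tl (posOf h tl) combo :)
    · rw [posOf_cons_ne c h tl hc, Wrec, if_neg hc, ← ih]
      simp only [List.map_map, Function.comp_def]
      refine List.map_congr_left (fun combo _ => ?_)
      exact (substAt_shift h tl (posOf c tl) combo :)

lemma posOf_Wrec (c c' : Char) (tos : List Char) (hcc : c' ≠ c) (hto : ∀ t ∈ tos, t ≠ c')
    (cs a : List Char) (ha : a ∈ Wrec c tos cs) : posOf c' a = posOf c' cs := by
  unfold posOf
  rw [Wrec_length c tos cs a ha]
  exact List.filter_congr (fun i _ => Wrec_getD c c' tos hcc hto cs a ha i ' ')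

set_option maxRecDepth 4096 in
lemma threeClass (cs : List Char) :
    (pvProdB (((posOf '?' cs).map (fun _ => ['.', 'X', 'O', ' '])
        ++ (posOf 'x' cs).map (fun _ => ['.', 'O', ' ']))
        ++ (posOf 'o' cs).map (fun _ => ['.', 'X', ' ']))).map
      (substAt cs ((posOf '?' cs ++ posOf 'x' cs) ++ posOf 'o' cs)) = W3 cs := by
  unfold W3
  rw [← classB '?' ['.', 'X', 'O', ' '] cs, List.flatMap_map]
  rw [prodB_append, prodB_append]
  simp only [List.map_flatMap, List.map_map, List.flatMap_assoc, List.flatMap_map,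
    Function.comp_def]
  refine List.flatMap_congr (fun c1 hc1 => ?_)
  have hlen1 : (posOf '?' cs).length = c1.length := by
    rw [length_of_mem_prodB _ _ hc1, List.length_map]
  have ha : substAt cs (posOf '?' cs) c1 ∈ Wrec '?' ['.', 'X', 'O', ' '] cs := by
    rw [← classB '?' ['.', 'X', 'O', ' '] cs]
    exact List.mem_map_of_mem hc1
  have hpsx : posOf 'x' (substAt cs (posOf '?' cs) c1) = posOf 'x' cs :=
    posOf_Wrec '?' 'x' ['.', 'X', 'O', ' '] (by decide) (by intro t ht; fin_cases ht <;> decide) cs _ ha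
  have hpso : posOf 'o' (substAt cs (posOf '?' cs) c1) = posOf 'o' cs :=
    posOf_Wrec '?' 'o' ['.', 'X', 'O', ' '] (by decide) (by intro t ht; fin_cases ht <;> decide) cs _ ha
  rw [← classB 'x' ['.', 'O', ' '] (substAt cs (posOf '?' cs) c1), List.flatMap_map, hpsx]
  refine List.flatMap_congr (fun c2 hc2 => ?_)
  have hlen2 : (posOf 'x' cs).length = c2.length := by
    rw [length_of_mem_prodB _ _ hc2, List.length_map]
  have hb : substAt (substAt cs (posOf '?' cs) c1) (posOf 'x' cs) c2
      ∈ Wrec 'x' ['.', 'O', ' '] (substAt cs (posOf '?' cs) c1) := by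
    rw [← classB 'x' ['.', 'O', ' '] (substAt cs (posOf '?' cs) c1), hpsx]
    exact List.mem_map_of_mem hc2
  have hpso2 : posOf 'o' (substAt (substAt cs (posOf '?' cs) c1) (posOf 'x' cs) c2)
      = posOf 'o' (substAt cs (posOf '?' cs) c1) :=
    posOf_Wrec 'x' 'o' ['.', 'O', ' '] (by decide) (by intro t ht; fin_cases ht <;> decide) _ _ hb
  rw [← classB 'o' ['.', 'X', ' '] (substAt (substAt cs (posOf '?' cs) c1) (posOf 'x' cs) c2),
    hpso2, hpso]
  refine List.map_congr_left (fun c3 hc3 => ?_)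
  rw [substAt_append cs _ _ _ _ (by rw [List.length_append, List.length_append, hlen1, hlen2]),
    substAt_append cs _ _ _ _ hlen1]

lemma wildcardsB_eq (s : String) : pvWildcardsB s = (W3 s.toList).map String.ofList := by
  have hslots : pvSlotsB s.toList
      = ((posOf '?' s.toList).map (fun i => (i, ['.', 'X', 'O', ' ']))
        ++ (posOf 'x' s.toList).map (fun i => (i, ['.', 'O', ' '])))
        ++ (posOf 'o' s.toList).map (fun i => (i, ['.', 'X', ' '])) := by
    simp [pvSlotsB, pvOptsB, posOf]
  unfold pvWildcardsB
  simp only [foldl_slots_eq_substAt]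
  rw [hslots]
  simp only [List.map_append, List.map_map, Function.comp_def]
  rw [show (fun (combo : List Char) => String.ofList
        (substAt s.toList (((posOf '?' s.toList).map (fun i => i) ++ (posOf 'x' s.toList).map (fun i => i))
          ++ (posOf 'o' s.toList).map (fun i => i)) combo))
      = String.ofList ∘ (substAt s.toList (((posOf '?' s.toList).map (fun i => i)
          ++ (posOf 'x' s.toList).map (fun i => i)) ++ (posOf 'o' s.toList).map (fun i => i))) from rfl]
  rw [← List.map_map]
  simp only [List.map_id']
  rw [threeClass]

lemma wildcardsB_eq_A (s : String) : pvWildcardsB s = pvWildcardsA s := by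
  rw [wildcardsB_eq, wildcardsA_eq]

-- ===== VERDICT (by name: the statement is the Claim_ definition above) =====
theorem pat3_expand_spec : Claim_equal_pat3_expand := by
  intro pat _ _
  unfold Spec_pat3_expand pat3_expand pat3_expand_alt
  have hrot : pvRot90B = pvRot90A := rfl
  have hvf : pvVertflipB = pvVertflipA := rfl
  have hhf : pvHorizflipB = pvHorizflipA := rfl
  have hsc : pvSwapcolorsB = pvSwapcolorsA := rfl
  simp only [List.foldl_cons, List.foldl_nil, hrot, hvf, hhf, hsc, wildcardsB_eq_A,
    List.flatMap_cons, List.flatMap_nil, List.append_nil,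
    List.flatMap_append, List.append_assoc]
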